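-- pv_equiv track=rewrite | github.com/hexs/Camera-Scan-Lot-No-Ink-Tank | arduino.py | splitCommand
-- ===== SOURCE A (Python) =====
-- def splitCommand(command: str):
--     """
--     # Examples:
--     >> splitCommand('set(abc,500)')
--     ['set', 'abc', '500']
--     >> splitCommand('get()')
--     ['get']
--     >> splitCommand('complex(a,b,c)')
--     ['complex', 'a', 'b', 'c']
--     >> splitCommand('no_parens')
--     ['no_parens']
--     """
--     # Check if the command contains parentheses
--     if '(' in command and command.endswith(')'):
--         # Split the command into function name and arguments
--         func_name, args_str = command.split('(', 1)
--         args_str = args_str[:-1]  # Remove the closing parenthesis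
--
--         # Split arguments and handle empty arguments
--         args = [arg.strip() for arg in args_str.split(',') if arg.strip()]
--
--         return [func_name] + args
--     else:
--         # If there are no parentheses, return the command as is
--         return [command]
-- ===== SOURCE B (Python) =====
-- def splitCommand(command: str):
--     i = command.find('(')
--     if i == -1 or not command.endswith(')'):
--         return [command]
--     result = [command[:i]]
--     tok = ''
--     pend = ''
--     for ch in command[i + 1:len(command) - 1]:
--         if ch == ',':
--             if tok:
--                 result.append(tok)
--             tok = ''
--             pend = ''
--         elif ch.isspace():
--             if tok:
--                 pend += ch
--         else:
--             tok += pend + ch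
--             pend = ''
--     if tok:
--         result.append(tok)
--     return result
-- ===== Notes on version B (the rewrite author's own statement) =====
-- stated objective: alternative
-- what changed: Replaces A's split-at-first-parenthesis plus comma-split-and-strip comprehension with a single-pass character state machine that tokenizes the argument region in one scan, trimming whitespace on the fly via a pending-whitespace buffer.
import Mathlib
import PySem

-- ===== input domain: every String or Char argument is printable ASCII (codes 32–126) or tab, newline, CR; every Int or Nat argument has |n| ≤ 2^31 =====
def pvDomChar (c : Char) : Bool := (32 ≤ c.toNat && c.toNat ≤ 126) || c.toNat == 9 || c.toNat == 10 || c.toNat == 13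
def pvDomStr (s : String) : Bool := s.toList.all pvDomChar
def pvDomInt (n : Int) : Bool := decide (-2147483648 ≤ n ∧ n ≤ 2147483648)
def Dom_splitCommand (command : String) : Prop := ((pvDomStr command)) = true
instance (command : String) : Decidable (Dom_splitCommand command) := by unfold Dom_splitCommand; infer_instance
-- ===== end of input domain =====

-- B replaces A's split-on-parenthesis plus per-argument strip comprehension by a one-pass
-- character state machine over the argument region (alternative decomposition, same cost).

-- ===== PORT A =====
-- literal transliteration of A: parenthesis membership and endswith guard, split at first
-- opening parenthesis, drop last char, comma-split with strip comprehension
def splitCommand (command : String) : List String :=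
  let cs := command.toList
  if PySem.Chars.isIn ['('] cs && PySem.Chars.endswith cs [')'] then
    let parts := PySem.Chars.splitOnMax cs ['('] 1
    let funcName := parts.getD 0 []
    let argsStr0 := parts.getD 1 []
    let argsStr := PySem.List.slice argsStr0 none (some (-1))
    let args := ((PySem.Chars.splitOn argsStr [',']).filter
        (fun a => !(PySem.Chars.strip a).isEmpty)).map PySem.Chars.strip
    String.ofList funcName :: args.map String.ofList
  else
    [command]

-- ===== PORT B =====
-- the loop body of Source B, state (result, tok, pend)
def pvStepB (s : List (List Char) × List Char × List Char) (ch : Char) :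
    List (List Char) × List Char × List Char :=
  match s with
  | (res, tok, pend) =>
    if ch = ',' then
      ((if tok.isEmpty then res else res ++ [tok]), [], [])
    else if PySem.Chars.strIsspace [ch] then
      (res, tok, if tok.isEmpty then pend else pend ++ [ch])
    else
      (res, tok ++ pend ++ [ch], [])

-- literal transliteration of Source B: find the first opening parenthesis, endswith guard,
-- one foldl over the argument region, final flush
def splitCommand_alt (command : String) : List String :=
  let cs := command.toList
  let i := PySem.Chars.find cs ['(']
  if i == -1 || !PySem.Chars.endswith cs [')'] then
    [command]
  else
    let inner := PySem.List.slice cs (some (i + 1)) (some ((PySem.Chars.len cs : Int) - 1))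
    match inner.foldl pvStepB ([PySem.List.slice cs none (some i)], [], []) with
    | (res, tok, _) => (if tok.isEmpty then res else res ++ [tok]).map String.ofList

-- ===== PRECONDITION & SPEC =====
def Spec_splitCommand (command : String) (out : List String) : Prop := out = splitCommand_alt command
instance (command : String) (out : List String) : Decidable (Spec_splitCommand command out) := by unfold Spec_splitCommand; infer_instance

-- ===== CLAIM (what is proved, stated in full; the proofs are below) =====
def Claim_equal_splitCommand : Prop := ∀ (command : String), Dom_splitCommand command → Spec_splitCommand command (splitCommand command)

-- ===== LEMMAS AND PROOFS =====

-- find.go on the single-char needle '(' returns the length of the longest '('-free prefix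
theorem pv_find_go (l : List Char) : ∀ k : Nat,
    PySem.Chars.find.go ['('] l k =
      if '(' ∈ l then ((k : Int) + (l.takeWhile (· ≠ '(')).length) else -1 := by
  induction l with
  | nil => intro k; simp [PySem.Chars.find.go]
  | cons c t ih =>
      intro k
      have hgo : PySem.Chars.find.go ['('] (c :: t) k =
          if ['('].isPrefixOf (c :: t) = true then (k : Int) else PySem.Chars.find.go ['('] t (k + 1) := rfl
      by_cases hc : c = '('
      · subst hc
        rw [hgo, if_pos (by simp)]
        rw [if_pos (by simp), List.takeWhile_cons_of_neg (by simp)]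
        simp
      · rw [hgo, if_neg (by simp [List.isPrefixOf_cons₂]; exact fun h => hc h.symm), ih]
        rw [List.takeWhile_cons_of_pos (by simp [hc])]
        by_cases hm : '(' ∈ t
        · rw [if_pos hm, if_pos (by simp [hm])]
          simp only [List.length_cons]; push_cast; ring
        · rw [if_neg hm, if_neg (by simp [hm, Ne.symm hc])]

-- splitOnMax.go with maxsplit exhausted returns the rest as one piece
theorem pv_splitOnMax_go0 (fuel : Nat) (l cur : List Char) (acc : List (List Char)) :
    PySem.Chars.splitOnMax.go ['('] fuel 0 l cur acc = ((cur.reverse ++ l) :: acc).reverse := by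
  cases fuel with
  | zero => rfl
  | succ f => cases l with
    | nil => simp [PySem.Chars.splitOnMax.go]
    | cons c t => rfl

-- splitOnMax.go with maxsplit 1 splits at the first '('
theorem pv_splitOnMax_go1 (l : List Char) : ∀ (fuel : Nat) (cur : List Char) (acc : List (List Char)),
    l.length ≤ fuel →
    PySem.Chars.splitOnMax.go ['('] fuel 1 l cur acc =
      if '(' ∈ l then
        acc.reverse ++ [cur.reverse ++ l.takeWhile (· ≠ '('), (l.dropWhile (· ≠ '(')).tail]
      else acc.reverse ++ [cur.reverse ++ l] := by
  induction l with
  | nil =>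
      intro fuel cur acc _
      cases fuel with
      | zero => simp [PySem.Chars.splitOnMax.go]
      | succ f => simp [PySem.Chars.splitOnMax.go]
  | cons c t ih =>
      intro fuel cur acc hf
      cases fuel with
      | zero => simp at hf
      | succ f =>
          have hgo : PySem.Chars.splitOnMax.go ['('] (f + 1) 1 (c :: t) cur acc =
              if ['('].isPrefixOf (c :: t) = true then
                PySem.Chars.splitOnMax.go ['('] f 0 (List.drop 1 (c :: t)) [] (cur.reverse :: acc)
              else PySem.Chars.splitOnMax.go ['('] f 1 t (c :: cur) acc := by
            simp [PySem.Chars.splitOnMax.go]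
          by_cases hc : c = '('
          · subst hc
            rw [hgo, if_pos (by simp), pv_splitOnMax_go0]
            rw [if_pos (by simp), List.takeWhile_cons_of_neg (by simp),
              List.dropWhile_cons_of_neg (by simp)]
            simp
          · rw [hgo, if_neg (by simp [List.isPrefixOf_cons₂]; exact fun h => hc h.symm),
              ih f (c :: cur) acc (by simpa using hf)]
            rw [List.takeWhile_cons_of_pos (by simp [hc]), List.dropWhile_cons_of_pos (by simp [hc])]
            by_cases hm : '(' ∈ t
            · rw [if_pos hm, if_pos (by simp [hm])]
              simp
            · rw [if_neg hm, if_neg (by simp [hm, Ne.symm hc])]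
              simp

-- splitOn.go on the single-char separator ',' is List.splitOnP
theorem pv_splitOn_go (l : List Char) : ∀ (fuel : Nat) (cur : List Char) (acc : List (List Char)),
    l.length ≤ fuel →
    PySem.Chars.splitOn.go [','] fuel l cur acc =
      acc.reverse ++ (List.splitOnP (· == ',') l).modifyHead (cur.reverse ++ ·) := by
  induction l with
  | nil =>
      intro fuel cur acc _
      cases fuel with
      | zero => simp [PySem.Chars.splitOn.go, List.splitOnP_nil]
      | succ f => simp [PySem.Chars.splitOn.go, List.splitOnP_nil]
  | cons c t ih =>
      intro fuel cur acc hf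
      cases fuel with
      | zero => simp at hf
      | succ f =>
          have hgo : PySem.Chars.splitOn.go [','] (f + 1) (c :: t) cur acc =
              if [','].isPrefixOf (c :: t) = true then
                PySem.Chars.splitOn.go [','] f (List.drop 1 (c :: t)) [] (cur.reverse :: acc)
              else PySem.Chars.splitOn.go [','] f t (c :: cur) acc := rfl
          by_cases hc : c = ','
          · subst hc
            rw [hgo, if_pos (by simp)]
            rw [show List.drop 1 (',' :: t) = t from rfl]
            rw [ih f [] (cur.reverse :: acc) (by simpa using hf)]
            rw [List.splitOnP_cons, if_pos (by simp)]
            cases h : List.splitOnP (· == ',') t with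
            | nil => exact absurd h (List.splitOnP_ne_nil _ t)
            | cons a r => simp
          · rw [hgo, if_neg (by simp [List.isPrefixOf_cons₂]; exact fun h => hc h.symm),
              ih f (c :: cur) acc (by simpa using hf)]
            rw [List.splitOnP_cons, if_neg (by simp [hc])]
            cases h : List.splitOnP (· == ',') t with
            | nil => exact absurd h (List.splitOnP_ne_nil _ t)
            | cons a r => simp

theorem pv_splitOn_comma (s : List Char) :
    PySem.Chars.splitOn s [','] = List.splitOnP (· == ',') s := by
  unfold PySem.Chars.splitOn
  rw [pv_splitOn_go s (s.length + 1) [] [] (by omega)]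
  cases h : List.splitOnP (· == ',') s with
  | nil => exact absurd h (List.splitOnP_ne_nil _ s)
  | cons a r => simp

-- the recursive mirror of Source B's loop
def pvF (tok pend : List Char) : List Char → List (List Char)
  | [] => if tok.isEmpty then [] else [tok]
  | c :: t =>
      if c = ',' then (if tok.isEmpty then [] else [tok]) ++ pvF [] [] t
      else if PySem.Chars.strIsspace [c] then
        pvF tok (if tok.isEmpty then pend else pend ++ [c]) t
      else pvF (tok ++ pend ++ [c]) [] t

theorem pv_fold_eq_pvF (l : List Char) : ∀ (res : List (List Char)) (tok pend : List Char),
    (match l.foldl pvStepB (res, tok, pend) with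
     | (r, t, _) => if t.isEmpty then r else r ++ [t]) = res ++ pvF tok pend l := by
  induction l with
  | nil => intro res tok pend; by_cases h : tok.isEmpty <;> simp [pvF, h]
  | cons c t ih =>
      intro res tok pend
      rw [List.foldl_cons]
      by_cases hc : c = ','
      · subst hc
        rw [show pvStepB (res, tok, pend) ',' = ((if tok.isEmpty then res else res ++ [tok]), [], []) from by
          simp [pvStepB]]
        rw [ih, pvF]
        by_cases h : tok.isEmpty <;> simp [h]
      · by_cases hs : PySem.Chars.strIsspace [c]
        · rw [show pvStepB (res, tok, pend) c = (res, tok, if tok.isEmpty then pend else pend ++ [c]) from by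
            simp [pvStepB, hc, hs]]
          rw [ih, pvF]
          simp [hc, hs]
        · rw [show pvStepB (res, tok, pend) c = (res, tok ++ pend ++ [c], []) from by
            simp [pvStepB, hc, hs]]
          rw [ih, pvF]
          simp [hc, hs]

theorem pv_rstrip_spaces (p : List Char) (hp : p.all PySem.Chars.isspace = true) :
    PySem.Chars.rstrip p = [] := by
  simp only [PySem.Chars.rstrip, List.reverse_eq_nil_iff, List.dropWhile_eq_nil_iff]
  intro x hx
  exact List.all_eq_true.mp hp x (List.mem_reverse.mp hx)

theorem pv_rstrip_append_cons (x h : List Char) (c : Char) (hc : PySem.Chars.isspace c = false) :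
    PySem.Chars.rstrip (x ++ c :: h) = x ++ c :: PySem.Chars.rstrip h := by
  simp only [PySem.Chars.rstrip, List.reverse_append, List.reverse_cons]
  rw [List.append_assoc, List.singleton_append, List.dropWhile_append]
  by_cases hr : (List.dropWhile PySem.Chars.isspace h.reverse).isEmpty
  · rw [if_pos hr, List.dropWhile_cons_of_neg (by simp [hc])]
    simp only [List.isEmpty_iff] at hr
    simp [hr]
  · rw [if_neg hr]
    simp

theorem pv_strip_cons_space (c : Char) (h : List Char) (hc : PySem.Chars.isspace c = true) :
    PySem.Chars.strip (c :: h) = PySem.Chars.strip h := by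
  simp [PySem.Chars.strip, PySem.Chars.lstrip, List.dropWhile_cons_of_pos hc]

theorem pv_strip_cons_nonspace (c : Char) (h : List Char) (hc : PySem.Chars.isspace c = false) :
    PySem.Chars.strip (c :: h) = c :: PySem.Chars.rstrip h := by
  have h2 := pv_rstrip_append_cons [] h c hc
  simp only [List.nil_append] at h2
  simp only [PySem.Chars.strip, PySem.Chars.lstrip]
  rw [List.dropWhile_cons_of_neg (by simp [hc])]
  exact h2

def pvMkTok (tok pend h : List Char) : List Char :=
  if tok.isEmpty then PySem.Chars.strip h else tok ++ PySem.Chars.rstrip (pend ++ h)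

def pvWrap (t : List Char) : List (List Char) := if t.isEmpty then [] else [t]

theorem pv_strIsspace_singleton (c : Char) :
    PySem.Chars.strIsspace [c] = PySem.Chars.isspace c := by
  simp [PySem.Chars.strIsspace]

theorem pv_rstrip_nil : PySem.Chars.rstrip [] = [] := rfl

-- the one-pass tokenizer computes strip-and-drop-empties over the comma segments
theorem pv_pvF_spec (l : List Char) : ∀ (tok pend : List Char),
    pend.all PySem.Chars.isspace = true →
    (tok.isEmpty = true → pend = []) →
    tok.dropWhile PySem.Chars.isspace = tok →
    PySem.Chars.rstrip tok = tok →
    pvF tok pend l =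
      (match List.splitOnP (· == ',') l with
       | [] => []
       | h :: r => pvWrap (pvMkTok tok pend h) ++
           (r.map PySem.Chars.strip).filter (fun t => !t.isEmpty)) := by
  induction l with
  | nil =>
      intro tok pend hp htp _ hr
      rw [List.splitOnP_nil]
      show pvF tok pend [] = pvWrap (pvMkTok tok pend []) ++ []
      rw [List.append_nil]
      by_cases h : tok.isEmpty
      · simp [pvF, pvWrap, pvMkTok, h, PySem.Chars.strip, PySem.Chars.lstrip, pv_rstrip_nil]
      · simp only [pvF, pvMkTok, h, Bool.false_eq_true, if_false, List.append_nil,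
          pv_rstrip_spaces pend hp, pvWrap]
  | cons c t ih =>
      intro tok pend hp htp hd hr
      rw [List.splitOnP_cons]
      by_cases hc : c = ','
      · subst hc
        rw [if_pos (by simp)]
        cases hsp : List.splitOnP (· == ',') t with
        | nil => exact absurd hsp (List.splitOnP_ne_nil _ t)
        | cons h r =>
            show (if tok.isEmpty then [] else [tok]) ++ pvF [] [] t = _
            rw [ih [] [] (by simp) (fun _ => rfl) rfl rfl, hsp]
            show (if tok.isEmpty then [] else [tok]) ++
                (pvWrap (pvMkTok [] [] h) ++ (r.map PySem.Chars.strip).filter (fun t => !t.isEmpty)) =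
              pvWrap (pvMkTok tok pend []) ++
                ((h :: r).map PySem.Chars.strip).filter (fun t => !t.isEmpty)
            have e1 : pvMkTok [] [] h = PySem.Chars.strip h := by simp [pvMkTok]
            have e2 : pvMkTok tok pend [] = if tok.isEmpty then [] else tok := by
              by_cases htok : tok.isEmpty
              · simp [pvMkTok, htok, PySem.Chars.strip, PySem.Chars.lstrip, pv_rstrip_nil]
              · simp [pvMkTok, htok, pv_rstrip_spaces pend hp]
            rw [e1, e2, List.map_cons, List.filter_cons]
            by_cases htok : tok.isEmpty <;>
              by_cases hsh : (PySem.Chars.strip h).isEmpty <;>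
                simp [pvWrap, htok, hsh]
      · rw [if_neg (by simp [hc])]
        by_cases hs : PySem.Chars.isspace c
        · have hstep : pvF tok pend (c :: t) =
              pvF tok (if tok.isEmpty then pend else pend ++ [c]) t := by
            rw [pvF, if_neg hc, if_pos (by rw [pv_strIsspace_singleton]; exact hs)]
          rw [hstep]
          have hp' : (if tok.isEmpty then pend else pend ++ [c]).all PySem.Chars.isspace = true := by
            by_cases htok : tok.isEmpty <;> simp [htok, hs, List.all_eq_true] <;>
              exact fun x hx => List.all_eq_true.mp hp x hx
          rw [ih tok _ hp' (fun h => by simp [htp h, h]) hd hr]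
          cases hsp : List.splitOnP (· == ',') t with
          | nil => exact absurd hsp (List.splitOnP_ne_nil _ t)
          | cons h r =>
              show pvWrap (pvMkTok tok _ h) ++ _ = pvWrap (pvMkTok tok pend (c :: h)) ++ _
              congr 2
              by_cases htok : tok.isEmpty
              · rw [if_pos htok]
                simp only [pvMkTok, htok, if_pos]
                exact (pv_strip_cons_space c h hs).symm
              · rw [if_neg htok]
                simp only [pvMkTok, htok, Bool.false_eq_true, if_false]
                rw [List.append_assoc, List.singleton_append]
        · have hstep : pvF tok pend (c :: t) = pvF (tok ++ pend ++ [c]) [] t := by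
            rw [pvF, if_neg hc, if_neg (by rw [pv_strIsspace_singleton]; simp [hs])]
          rw [hstep]
          have hcn : PySem.Chars.isspace c = false := by simp [hs]
          have hd' : (tok ++ pend ++ [c]).dropWhile PySem.Chars.isspace = tok ++ pend ++ [c] := by
            cases htok : tok with
            | nil =>
                rw [htp (by simp [htok])]
                simp only [List.nil_append]
                rw [List.dropWhile_cons_of_neg (by simp [hcn])]
            | cons a t' =>
                have ha : PySem.Chars.isspace a = false := by
                  by_contra hx
                  have hx' : PySem.Chars.isspace a = true := by
                    cases hy : PySem.Chars.isspace a
                    · exact absurd hy hx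
                    · rfl
                  rw [htok, List.dropWhile_cons_of_pos hx'] at hd
                  have := congrArg List.length hd
                  simp at this
                  have h2 := List.length_dropWhile_le PySem.Chars.isspace t'
                  omega
                simp only [List.cons_append, List.append_assoc]
                rw [List.dropWhile_cons_of_neg (by simp [ha])]
          have hr' : PySem.Chars.rstrip (tok ++ pend ++ [c]) = tok ++ pend ++ [c] := by
            have := pv_rstrip_append_cons (tok ++ pend) [] c hcn
            simpa [pv_rstrip_nil] using this
          rw [ih (tok ++ pend ++ [c]) [] (by simp) (by simp) hd' hr']
          cases hsp : List.splitOnP (· == ',') t with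
          | nil => exact absurd hsp (List.splitOnP_ne_nil _ t)
          | cons h r =>
              show pvWrap (pvMkTok _ [] h) ++ _ = pvWrap (pvMkTok tok pend (c :: h)) ++ _
              congr 2
              by_cases htok : tok.isEmpty
              · have htn : tok = [] := by simpa using htok
                have hpn : pend = [] := htp htok
                subst htn; subst hpn
                simp only [pvMkTok, List.nil_append]
                rw [if_neg (by simp), if_pos (by simp)]
                exact (pv_strip_cons_nonspace c h hcn).symm
              · have hne : (tok ++ pend ++ [c]).isEmpty = false := by simp
                simp only [pvMkTok, htok, Bool.false_eq_true, if_false, hne, List.nil_append]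
                rw [pv_rstrip_append_cons pend h c hcn]
                simp [List.append_assoc]

theorem pv_fold_proj (l : List Char) (res : List (List Char)) (tok pend : List Char) :
    (if (l.foldl pvStepB (res, tok, pend)).2.1.isEmpty = true
     then (l.foldl pvStepB (res, tok, pend)).1
     else (l.foldl pvStepB (res, tok, pend)).1 ++ [(l.foldl pvStepB (res, tok, pend)).2.1])
    = res ++ pvF tok pend l := by
  have h := pv_fold_eq_pvF l res tok pend
  rcases hf : l.foldl pvStepB (res, tok, pend) with ⟨r, t, p⟩
  rw [hf] at h
  exact h

-- ===== VERDICT (by name: the statement is the Claim_ definition above) =====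
theorem splitCommand_spec : Claim_equal_splitCommand := by
  intro command _
  show splitCommand command = splitCommand_alt command
  unfold splitCommand splitCommand_alt
  by_cases hE : PySem.Chars.endswith command.toList [')'] = true
  · by_cases hF : PySem.Chars.find command.toList ['('] = -1
    · have hIn : PySem.Chars.isIn ['('] command.toList = false := by
        simp [PySem.Chars.isIn, hF]
      simp [hE, hF, hIn]
    · have hmem : '(' ∈ command.toList := by
        by_contra hm
        exact hF (by show PySem.Chars.find.go ['('] command.toList 0 = -1
                     rw [pv_find_go command.toList 0, if_neg hm])
      have hfind : PySem.Chars.find command.toList ['('] =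
          ((command.toList.takeWhile (· ≠ '(')).length : Int) := by
        show PySem.Chars.find.go ['('] command.toList 0 = _
        rw [pv_find_go command.toList 0, if_pos hmem]
        simp
      have hIn : PySem.Chars.isIn ['('] command.toList = true := by
        show (PySem.Chars.find command.toList ['('] != -1) = true
        rw [hfind]
        simp only [bne_iff_ne, ne_eq]
        omega
      have hBeq : (PySem.Chars.find command.toList ['('] == -1) = false := by
        rw [hfind]
        simp only [beq_eq_false_iff_ne, ne_eq]
        omega
      simp only [hIn, hE, hBeq, Bool.not_true, Bool.or_false, Bool.and_self, if_true,
        Bool.false_eq_true, if_false]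
      set cs := command.toList with hcs
      set w := (cs.takeWhile (· ≠ '(')).length with hw
      have htw : cs.takeWhile (· ≠ '(') = cs.take w :=
        List.prefix_iff_eq_take.mp (List.takeWhile_prefix _)
      have hwle : w ≤ cs.length := by
        rw [hw, htw, List.length_take]
        omega
      have hwlt : w < cs.length := by
        rcases Nat.lt_or_ge w cs.length with h | h
        · exact h
        · exfalso
          have hweq : w = cs.length := le_antisymm hwle h
          have hteq : cs.takeWhile (· ≠ '(') = cs := by
            rw [htw, hweq, List.take_length]
          have := List.mem_takeWhile_imp (l := cs) (p := (· ≠ '(')) (by rw [hteq]; exact hmem)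
          simp at this
      have hparts : PySem.Chars.splitOnMax cs ['('] 1 =
          [cs.takeWhile (· ≠ '('), (cs.dropWhile (· ≠ '(')).tail] := by
        unfold PySem.Chars.splitOnMax
        rw [if_neg (by norm_num)]
        rw [show ((1 : Int)).toNat = 1 from rfl]
        rw [pv_splitOnMax_go1 cs (cs.length + 1) [] [] (by omega), if_pos hmem]
        simp
      have hdw : cs.dropWhile (· ≠ '(') = cs.drop w := by
        have h1 : cs.takeWhile (· ≠ '(') ++ cs.dropWhile (· ≠ '(') = cs.take w ++ cs.drop w := by
          rw [List.takeWhile_append_dropWhile, List.take_append_drop]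
        rw [htw] at h1
        exact List.append_cancel_left h1
      have hinner : PySem.List.slice cs (some (PySem.Chars.find cs ['('] + 1))
          (some ((PySem.Chars.len cs : Int) - 1)) = ((cs.dropWhile (· ≠ '(')).tail).dropLast := by
        rw [hfind, PySem.Chars.len_eq]
        rw [show ((w : Int) + 1) = ((w + 1 : Nat) : Int) by push_cast; ring]
        rw [show ((cs.length : Int) - 1) = ((cs.length - 1 : Nat) : Int) by omega]
        rw [PySem.List.slice_natCast]
        rw [hdw, List.tail_drop, List.dropLast_eq_take, List.length_drop]
        congr 1
        omega
      have hfirst : PySem.List.slice cs none (some (PySem.Chars.find cs ['('])) =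
          cs.takeWhile (· ≠ '(') := by
        rw [hfind, PySem.List.slice_to_natCast, htw]
      rw [hparts, hfirst, hinner]
      rw [show ([cs.takeWhile (· ≠ '('), (cs.dropWhile (· ≠ '(')).tail].getD 0 []) =
        cs.takeWhile (· ≠ '(') from rfl]
      rw [show ([cs.takeWhile (· ≠ '('), (cs.dropWhile (· ≠ '(')).tail].getD 1 []) =
        (cs.dropWhile (· ≠ '(')).tail from rfl]
      rw [PySem.List.slice_to_neg_one]
      rw [pv_fold_proj (((cs.dropWhile (· ≠ '(')).tail).dropLast) [cs.takeWhile (· ≠ '(')] [] []]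
      have hAtoks : pvF [] [] (((cs.dropWhile (· ≠ '(')).tail).dropLast) =
          ((List.splitOnP (· == ',') (((cs.dropWhile (· ≠ '(')).tail).dropLast)).filter
            (fun a => !(PySem.Chars.strip a).isEmpty)).map PySem.Chars.strip := by
        rw [pv_pvF_spec _ [] [] (by simp) (by simp) rfl rfl]
        cases hsp : List.splitOnP (· == ',') (((cs.dropWhile (· ≠ '(')).tail).dropLast) with
        | nil => exact absurd hsp (List.splitOnP_ne_nil _ _)
        | cons h r =>
            have e1 : pvMkTok [] [] h = PySem.Chars.strip h := by simp [pvMkTok]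
            have e2 : (r.filter (fun a => !(PySem.Chars.strip a).isEmpty)).map PySem.Chars.strip =
                (r.map PySem.Chars.strip).filter (fun t => !t.isEmpty) := by
              rw [List.filter_map]
              rfl
            rw [List.filter_cons]
            by_cases hsh : (PySem.Chars.strip h).isEmpty
            · simp [pvWrap, pvMkTok, hsh, e2]
            · simp [pvWrap, pvMkTok, hsh, e2]
      rw [pv_splitOn_comma, ← hAtoks]
      simp
  · have hE' : PySem.Chars.endswith command.toList [')'] = false := by
      cases h : PySem.Chars.endswith command.toList [')']
      · rfl
      · exact absurd h hE
    simp [hE']
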